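-- pv_equiv track=rewrite | github.com/blzzua/codewars | 7-kyu/simple_fun24_pages_numbering_with_ink.py | pages_numbering_with_ink
-- ===== SOURCE A (Python) =====
-- def pages_numbering_with_ink(current, number_of_digits):
--     while number_of_digits:
--         cur_len = len(str(current))
--         if number_of_digits >= cur_len:
--             number_of_digits -= cur_len
--             current = current+1
--         else:
--             break
--     return current - 1
-- ===== SOURCE B (Python) =====
-- def pages_numbering_with_ink(current, number_of_digits):
--     # Walk whole digit-length blocks, bulk-subtracting each block's ink cost;
--     # finish the last (partial) block with one floor division.
--     length = len(str(current))
--     while True: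
--         cost = (10 ** length - current) * length
--         if number_of_digits < cost:
--             break
--         number_of_digits -= cost
--         current = 10 ** length
--         length += 1
--     if number_of_digits > 0:
--         current += number_of_digits // length
--     return current - 1
-- ===== Notes on version B (the rewrite author's own statement) =====
-- stated objective: faster
-- what changed: B walks digit-length blocks, bulk-subtracting each whole block's ink cost and finishing the partial block with one floor division, instead of simulating one page per iteration; Pre_ excludes negative current, where len(str(current)) counts the '-' sign so A's per-page cost is a string-formatting artefact outside the page-numbering domain.
-- outside the precondition, e.g. on pages_numbering_with_ink(-2, 5): A returns 0, B returns -1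
import Mathlib
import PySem

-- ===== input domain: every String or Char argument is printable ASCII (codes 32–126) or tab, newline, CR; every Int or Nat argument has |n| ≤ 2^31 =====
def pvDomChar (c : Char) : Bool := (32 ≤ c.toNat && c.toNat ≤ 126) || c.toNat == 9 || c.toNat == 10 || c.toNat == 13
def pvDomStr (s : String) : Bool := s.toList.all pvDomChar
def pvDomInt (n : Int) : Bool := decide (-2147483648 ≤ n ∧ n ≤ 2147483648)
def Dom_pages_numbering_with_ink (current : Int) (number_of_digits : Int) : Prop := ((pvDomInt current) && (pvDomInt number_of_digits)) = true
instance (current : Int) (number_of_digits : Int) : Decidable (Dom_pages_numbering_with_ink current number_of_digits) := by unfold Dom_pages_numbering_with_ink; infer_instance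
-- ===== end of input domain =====

-- B replaces A's page-by-page simulation by a walk over digit-length blocks (objective: faster,
-- asymptotic); equality of the return values is proved for every nonnegative current.

-- `len(str(c))` as an Int (both Pythons compute `len(str(...))`)
def pvStrLen (c : Int) : Int := PySem.Str.len (PySem.Int.toStr c)

-- exact length of Nat.toDigitsCore (needed for the ports' termination: len(str(c)) ≥ 1)
theorem pvToDigitsCoreLen : ∀ (f n : Nat) (acc : List Char), n < f →
    (Nat.toDigitsCore 10 f n acc).length = Nat.log 10 n + 1 + acc.length := by
  intro f
  induction f with
  | zero => intro n acc h; omega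
  | succ f ih =>
    intro n acc h
    rw [Nat.toDigitsCore]
    by_cases h10 : n / 10 = 0
    · have hn : n < 10 := by omega
      simp [h10, Nat.log_eq_zero_iff.mpr (Or.inl hn)]
      omega
    · have hn : 10 ≤ n := by
        by_contra hc; exact h10 (Nat.div_eq_of_lt (by omega))
      simp only [h10, if_false]
      rw [ih (n / 10) _ (by omega)]
      have hlog : Nat.log 10 n = Nat.log 10 (n / 10) + 1 := by
        have h1 := Nat.log_div_base 10 n
        have h2 : 0 < Nat.log 10 n := Nat.log_pos (by omega) hn
        omega
      simp only [List.length_cons]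
      omega

theorem pvStrLen_eq (c : Int) :
    pvStrLen c = if c < 0 then (Nat.log 10 c.natAbs : Int) + 2 else (Nat.log 10 c.toNat : Int) + 1 := by
  have hlen : ∀ n : Nat, (Nat.toDigits 10 n).length = Nat.log 10 n + 1 := fun n => by
    simpa [Nat.toDigits] using pvToDigitsCoreLen (n + 1) n [] (by omega)
  unfold pvStrLen
  rw [PySem.Str.len, PySem.Int.toList_toStr]
  unfold PySem.Int.toChars
  split_ifs with h <;> simp [hlen] <;> push_cast <;> ring

theorem pvStrLen_pos (c : Int) : 1 ≤ pvStrLen c := by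
  rw [pvStrLen_eq]; split_ifs <;> omega

-- ===== PORT A =====
-- the `while number_of_digits:` loop of A, page by page
def pvLoopA (current : Int) (number_of_digits : Int) : Int :=
  if number_of_digits ≠ 0 then
    if number_of_digits ≥ pvStrLen current then
      pvLoopA (current + 1) (number_of_digits - pvStrLen current)
    else current - 1
  else current - 1
termination_by number_of_digits.toNat
decreasing_by
  have := pvStrLen_pos current
  omega

def pages_numbering_with_ink (current : Int) (number_of_digits : Int) : Int :=
  pvLoopA current number_of_digits

-- ===== PORT B =====
-- B's `while True:` loop over digit-length blocks, together with the code after the break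
-- (`if number_of_digits > 0: current += number_of_digits // length; return current - 1`).
-- The `1 ≤ cost` test is a totality guard only: with `length = len(str(current))` the block
-- cost is always positive, so the final `else` branch is never reached from the entry point.
def pvLoopB (current : Int) (length : Int) (ink : Int) : Int :=
  let cost := (10 ^ length.toNat - current) * length
  if ink < cost then
    if ink > 0 then current + PySem.Int.floordiv ink length - 1 else current - 1
  else if h : 1 ≤ cost then
    pvLoopB (10 ^ length.toNat) (length + 1) (ink - cost)
  else current - 1
termination_by ink.toNat
decreasing_by omega

def pages_numbering_with_ink_alt (current : Int) (number_of_digits : Int) : Int :=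
  pvLoopB current (pvStrLen current) number_of_digits

-- ===== PRECONDITION & SPEC =====
-- Pre_ excludes negative `current`: there len(str(current)) counts the '-' sign, so A's per-page
-- ink cost is an artefact of string formatting outside the page-numbering domain, and B's
-- block arithmetic naturally differs from it.
def Pre_pages_numbering_with_ink (current : Int) (number_of_digits : Int) : Prop := 0 ≤ current
instance (current : Int) (number_of_digits : Int) : Decidable (Pre_pages_numbering_with_ink current number_of_digits) := by unfold Pre_pages_numbering_with_ink; infer_instance
def pvWitness_pages_numbering_with_ink : Int × Int := (7, 25)

def Spec_pages_numbering_with_ink (current : Int) (number_of_digits : Int) (out : Int) : Prop := out = pages_numbering_with_ink_alt current number_of_digits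
instance (current : Int) (number_of_digits : Int) (out : Int) : Decidable (Spec_pages_numbering_with_ink current number_of_digits out) := by unfold Spec_pages_numbering_with_ink; infer_instance

-- ===== CLAIM (what is proved, stated in full; the proofs are below) =====
def Claim_equal_pages_numbering_with_ink : Prop := ∀ (current : Int) (number_of_digits : Int), Dom_pages_numbering_with_ink current number_of_digits → Pre_pages_numbering_with_ink current number_of_digits → Spec_pages_numbering_with_ink current number_of_digits (pages_numbering_with_ink current number_of_digits)

-- ===== LEMMAS AND PROOFS =====

-- the last page whose decimal string has the same length as c (for 0 ≤ c)
def pvEnd (c : Int) : Int := 10 ^ (pvStrLen c).toNat - 1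

theorem pvEnd_ge (c : Int) (hc : 0 ≤ c) : c ≤ pvEnd c := by
  unfold pvEnd
  rw [pvStrLen_eq, if_neg (not_lt.mpr hc)]
  have h1 : c.toNat < 10 ^ (Nat.log 10 c.toNat + 1) :=
    Nat.lt_pow_succ_log_self (by omega) _
  have h2 : ((Nat.log 10 c.toNat : Int) + 1).toNat = Nat.log 10 c.toNat + 1 := by omega
  rw [h2]
  have hcast : (((10:Nat) ^ (Nat.log 10 c.toNat + 1) : Nat) : Int) = (10:Int) ^ (Nat.log 10 c.toNat + 1) := by push_cast; ring
  omega

theorem pvCost_pos (c : Int) (hc : 0 ≤ c) : 1 ≤ (pvEnd c - c + 1) * pvStrLen c := by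
  have h1 := pvEnd_ge c hc
  have h2 := pvStrLen_pos c
  have := mul_pos (a := pvEnd c - c + 1) (b := pvStrLen c) (by omega) (by omega)
  omega

theorem pvStrLen_succ (c : Int) (hc : 0 ≤ c) (h : c < pvEnd c) : pvStrLen (c + 1) = pvStrLen c := by
  have h2 : ((Nat.log 10 c.toNat : Int) + 1).toNat = Nat.log 10 c.toNat + 1 := by omega
  have h' : c < (10:Int) ^ (Nat.log 10 c.toNat + 1) - 1 := by
    have hh := h
    unfold pvEnd at hh
    rw [pvStrLen_eq, if_neg (not_lt.mpr hc), h2] at hh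
    exact hh
  have hc1 : ¬ (c + 1 < 0) := by omega
  have ht : (c + 1).toNat = c.toNat + 1 := by omega
  have hcast : (((10:Nat) ^ (Nat.log 10 c.toNat + 1) : Nat) : Int) = (10:Int) ^ (Nat.log 10 c.toNat + 1) := by
    push_cast; ring
  have hub : c.toNat + 1 < 10 ^ (Nat.log 10 c.toNat + 1) := by omega
  have hlog : Nat.log 10 (c.toNat + 1) = Nat.log 10 c.toNat := by
    by_cases hL : Nat.log 10 c.toNat = 0
    · rw [hL] at hub ⊢
      norm_num at hub
      exact Nat.log_eq_zero_iff.mpr (Or.inl hub)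
    · have hc0 : c.toNat ≠ 0 := fun h0 => hL (by rw [h0]; simp)
      have hlb : (10:Nat) ^ Nat.log 10 c.toNat ≤ c.toNat := Nat.pow_log_le_self 10 hc0
      exact Nat.log_eq_of_pow_le_of_lt_pow (Nat.le_succ_of_le hlb) hub
  rw [pvStrLen_eq, pvStrLen_eq, if_neg hc1, if_neg (not_lt.mpr hc), ht, hlog]

theorem pvEnd_succ (c : Int) (hc : 0 ≤ c) (h : c < pvEnd c) : pvEnd (c + 1) = pvEnd c := by
  unfold pvEnd
  rw [pvStrLen_succ c hc h]

theorem pvStrLen_pow (k : Nat) : pvStrLen ((10:Int) ^ k) = (k : Int) + 1 := by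
  have h0 : (0:Int) ≤ (10:Int) ^ k := by positivity
  have ht : ((10:Int) ^ k).toNat = 10 ^ k := by
    have : ((10:Nat) ^ k : Int) = (10:Int) ^ k := by push_cast; ring
    omega
  rw [pvStrLen_eq, if_neg (not_lt.mpr h0), ht, Nat.log_pow (by omega)]

-- A's page-by-page loop crosses one whole digit-length block in one step of B's shape
theorem pvBlockStep : ∀ (fuel : Nat) (current ink : Int), ink.toNat ≤ fuel → 0 ≤ current →
    pvLoopA current ink =
      (if ink < (pvEnd current - current + 1) * pvStrLen current
       then (if ink > 0 then current + PySem.Int.floordiv ink (pvStrLen current) - 1 else current - 1)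
       else pvLoopA (pvEnd current + 1) (ink - (pvEnd current - current + 1) * pvStrLen current)) := by
  intro fuel
  induction fuel with
  | zero =>
    intro current ink hf hc
    have hz : ink ≤ 0 := by omega
    have hcost := pvCost_pos current hc
    have hL := pvStrLen_pos current
    rw [pvLoopA]
    rw [if_pos (by omega : ink < (pvEnd current - current + 1) * pvStrLen current)]
    rw [if_neg (by omega : ¬ ink > 0)]
    by_cases h0 : ink = 0
    · simp [h0]
    · simp only [ne_eq, h0, not_false_eq_true, if_true]
      rw [if_neg (by omega)]
  | succ fuel ih =>
    intro current ink hf hc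
    have hL := pvStrLen_pos current
    have hE := pvEnd_ge current hc
    have hc1 := pvCost_pos current hc
    rw [pvLoopA]
    by_cases hz : ink = 0
    · subst hz
      simp only [ne_eq, not_true_eq_false, if_false]
      rw [if_pos (by omega), if_neg (by omega : ¬ (0:Int) > 0)]
    · simp only [ne_eq, hz, not_false_eq_true, if_true]
      by_cases hge : ink ≥ pvStrLen current
      · rw [if_pos hge]
        by_cases heq : current = pvEnd current
        · -- last page of the block: the block's whole cost is exactly pvStrLen current
          rw [if_neg (by rw [← heq]; push_neg; nlinarith [pvStrLen_pos current])]
          rw [← heq]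
          have : (current - current + 1) * pvStrLen current = pvStrLen current := by ring
          rw [this]
        · have hlt : current < pvEnd current := lt_of_le_of_ne hE heq
          rw [ih (current + 1) (ink - pvStrLen current) (by omega) (by omega)]
          rw [pvStrLen_succ current hc hlt, pvEnd_succ current hc hlt]
          have harith : (pvEnd current - (current + 1) + 1) * pvStrLen current
              = (pvEnd current - current + 1) * pvStrLen current - pvStrLen current := by ring
          rw [harith]
          by_cases hcc : ink < (pvEnd current - current + 1) * pvStrLen current
          · rw [if_pos (by omega), if_pos hcc]
            by_cases hrem : ink - pvStrLen current > 0
            · rw [if_pos hrem, if_pos (by omega)]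
              have hdiv : PySem.Int.floordiv (ink - pvStrLen current) (pvStrLen current)
                  = PySem.Int.floordiv ink (pvStrLen current) - 1 := by
                simp only [PySem.Int.floordiv]
                rw [show ink - pvStrLen current = ink + (-1) * pvStrLen current by ring]
                rw [Int.add_mul_fdiv_right _ _ (by omega)]
                ring
              rw [hdiv]
              ring
            · -- ink = len exactly: the new page is the last affordable one
              have hink : ink = pvStrLen current := by omega
              rw [if_neg hrem, if_pos (by omega)]
              have hdiv : PySem.Int.floordiv ink (pvStrLen current) = 1 := by
                simp only [PySem.Int.floordiv, hink]
                rw [Int.fdiv_self (by omega)]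
              rw [hdiv]
          · rw [if_neg (by omega), if_neg hcc]
            congr 1
            ring
      · -- ink < len(str(current)) : A breaks; B's partial block affords 0 further pages
        rw [if_neg hge]
        push_neg at hge
        have hcost : pvStrLen current ≤ (pvEnd current - current + 1) * pvStrLen current :=
          le_mul_of_one_le_left (by omega) (by omega)
        rw [if_pos (by omega)]
        by_cases hp : ink > 0
        · rw [if_pos hp]
          have hdiv : PySem.Int.floordiv ink (pvStrLen current) = 0 := by
            simp only [PySem.Int.floordiv]
            exact Int.fdiv_eq_zero_of_lt (by omega) hge
          rw [hdiv]
          ring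
        · rw [if_neg hp]

-- A's loop equals B's block loop whenever the length argument is len(str(current))
theorem pvLoops_eq : ∀ (fuel : Nat) (current ink : Int), ink.toNat ≤ fuel → 0 ≤ current →
    pvLoopA current ink = pvLoopB current (pvStrLen current) ink := by
  intro fuel
  induction fuel with
  | zero =>
    intro current ink hf hc
    have hz : ink ≤ 0 := by omega
    have hL := pvStrLen_pos current
    have hcost := pvCost_pos current hc
    have hc2 : (pvEnd current - current + 1) * pvStrLen current
        = (10 ^ (pvStrLen current).toNat - current) * pvStrLen current := by
      unfold pvEnd; ring
    rw [pvLoopB]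
    split_ifs with h1 h2
    · exact absurd h2 (by omega)
    · rw [pvLoopA]
      by_cases h0 : ink = 0
      · simp [h0]
      · simp only [ne_eq, h0, not_false_eq_true, if_true]
        rw [if_neg (by omega)]
    · omega
    · omega
  | succ fuel ih =>
    intro current ink hf hc
    have hcost := pvCost_pos current hc
    have hEnd : pvEnd current + 1 = 10 ^ (pvStrLen current).toNat := by unfold pvEnd; ring
    have hc2 : (pvEnd current - current + 1) * pvStrLen current
        = (10 ^ (pvStrLen current).toNat - current) * pvStrLen current := by
      unfold pvEnd; ring
    have hlen : pvStrLen (pvEnd current + 1) = pvStrLen current + 1 := by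
      rw [hEnd, pvStrLen_pow]
      have hL := pvStrLen_pos current
      omega
    rw [pvBlockStep ink.toNat current ink (le_refl _) hc]
    rw [pvLoopB, ← hc2]
    split_ifs with h1 h2
    · rfl
    · rfl
    · have hnext : 0 ≤ pvEnd current + 1 := by
        have := pvEnd_ge current hc; omega
      have hrec := ih (pvEnd current + 1) (ink - (pvEnd current - current + 1) * pvStrLen current)
        (by omega) hnext
      rw [hlen] at hrec
      rw [← hEnd]
      exact hrec

-- ===== VERDICT (by name: the statement is the Claim_ definition above) =====
theorem pages_numbering_with_ink_spec : Claim_equal_pages_numbering_with_ink := by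
  intro current number_of_digits _ hpre
  unfold Spec_pages_numbering_with_ink pages_numbering_with_ink pages_numbering_with_ink_alt
  exact pvLoops_eq number_of_digits.toNat current number_of_digits (le_refl _) hpre
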